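-- pv_equiv track=rewrite | github.com/jiahao-shen/Numerical-and-Symbolic-Calculations | lab1.py | equation_2
-- ===== SOURCE A (Python) =====
-- def equation_2(n):
--     g = [0 for _ in range(n * n)]
--     b = [0 for _ in range(n)]
--
--     for i in range(n):
--         g[i * n + n - 1] = 1
--         g[i * n + i] = 1
--
--         for j in range(i):
--             g[i * n + j] = -1
--
--     for i in range(n):
--         for j in range(n):
--             b[i] += g[i * n + j]
--
--     return g, b
-- ===== SOURCE B (Python) =====
-- def equation_2(n):
--     g = [0] * (n * n)
--     for i in range(n):
--         if i < n - 1: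
--             g[i * n:(i + 1) * n] = [-1] * i + [1] + [0] * (n - i - 2) + [1]
--         else:
--             g[i * n:(i + 1) * n] = [-1] * i + [1]
--     b = [2 - i for i in range(n - 1)] + ([2 - n] if n > 0 else [])
--     return g, b
-- ===== Notes on version B (the rewrite author's own statement) =====
-- stated objective: faster
-- what changed: g is built by splicing each whole row (constructed by list concatenation) into a flat buffer instead of cell-by-cell index assignments, and the entire O(n^2) second pass summing rows is replaced by the closed form b[i] = 2 - i (2 - n for the last row).
import Mathlib
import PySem

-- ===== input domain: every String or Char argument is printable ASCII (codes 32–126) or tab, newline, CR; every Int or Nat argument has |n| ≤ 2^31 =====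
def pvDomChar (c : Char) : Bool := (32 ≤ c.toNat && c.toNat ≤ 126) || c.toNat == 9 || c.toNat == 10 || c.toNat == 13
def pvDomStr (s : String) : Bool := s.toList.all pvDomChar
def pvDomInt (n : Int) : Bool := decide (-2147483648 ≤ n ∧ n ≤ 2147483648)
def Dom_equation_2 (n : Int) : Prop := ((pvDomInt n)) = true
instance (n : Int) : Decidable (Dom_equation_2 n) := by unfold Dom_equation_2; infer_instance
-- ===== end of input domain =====

-- B splices each whole matrix row into the flat buffer and computes the row-sum vector b by the
-- closed form b[i] = 2 - i (2 - n for the last row), removing A's second nested summing pass.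

-- ===== PORT A =====
-- Python lists g and b are represented as Array Int (O(1) index reads/writes, like CPython
-- lists); every index this code reads or writes is in range, where Array.getD/setIfInBounds
-- agree exactly with Python indexing.
def equation_2 (n : Int) : List Int × List Int :=
  let g0 := ((PySem.List.pyRange 0 (n * n) 1).map (fun _ => (0 : Int))).toArray
  let b0 := ((PySem.List.pyRange 0 n 1).map (fun _ => (0 : Int))).toArray
  let g := (PySem.List.pyRange 0 n 1).foldl (fun g i =>
      let g := g.setIfInBounds (i * n + n - 1).toNat 1
      let g := g.setIfInBounds (i * n + i).toNat 1
      (PySem.List.pyRange 0 i 1).foldl (fun g j => g.setIfInBounds (i * n + j).toNat (-1)) g) g0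
  let b := (PySem.List.pyRange 0 n 1).foldl (fun b i =>
      (PySem.List.pyRange 0 n 1).foldl (fun b j =>
        b.setIfInBounds i.toNat (b.getD i.toNat 0 + g.getD (i * n + j).toNat 0)) b) b0
  (g.toList, b.toList)

-- ===== PORT B =====
def equation_2_alt (n : Int) : List Int × List Int :=
  let g0 := List.replicate (n * n).toNat (0 : Int)
  let g := (PySem.List.pyRange 0 n 1).foldl (fun g i =>
      let row := if i < n - 1 then
          List.replicate i.toNat (-1 : Int) ++ [1] ++ List.replicate (n - i - 2).toNat (0 : Int) ++ [1]
        else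
          List.replicate i.toNat (-1 : Int) ++ [1]
      g.take (i * n).toNat ++ row ++ g.drop ((i + 1) * n).toNat) g0
  let b := (PySem.List.pyRange 0 (n - 1) 1).map (fun i => 2 - i) ++ (if 0 < n then [2 - n] else [])
  (g, b)

-- ===== PRECONDITION & SPEC =====
def Spec_equation_2 (n : Int) (out : List Int × List Int) : Prop := out = equation_2_alt n
instance (n : Int) (out : List Int × List Int) : Decidable (Spec_equation_2 n out) := by unfold Spec_equation_2; infer_instance

-- ===== CLAIM (what is proved, stated in full; the proofs are below) =====
def Claim_equal_equation_2 : Prop := ∀ (n : Int), Dom_equation_2 n → Spec_equation_2 n (equation_2 n)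

-- ===== LEMMAS AND PROOFS =====

-- the i-th row of the matrix, as both programs produce it
def rowN (N i : Nat) : List Int :=
  if i < N - 1 then List.replicate i (-1) ++ 1 :: (List.replicate (N - i - 2) 0 ++ [1])
  else List.replicate i (-1) ++ [1]

-- the sum of the i-th row
def rsum (N i : Nat) : Int := if i = N - 1 then 2 - (N : Int) else 2 - (i : Int)

-- the finished matrix
def gsp (N : Nat) : List Int := (List.range N).flatMap (rowN N)

-- A's work on row i, Nat-indexed
def stepA (N : Nat) (g : List Int) (i : Nat) : List Int :=
  (List.range i).foldl (fun g j => g.set (i * N + j) (-1))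
    ((g.set (i * N + N - 1) 1).set (i * N + i) 1)

-- B's work on row i, Nat-indexed
def stepB (N : Nat) (g : List Int) (i : Nat) : List Int :=
  g.take (i * N) ++ rowN N i ++ g.drop ((i + 1) * N)

theorem length_rowN (N i : Nat) (h : i < N) : (rowN N i).length = N := by
  unfold rowN; split_ifs with h1 <;> simp <;> omega

theorem sum_rowN (N i : Nat) (h : i < N) : (rowN N i).sum = rsum N i := by
  unfold rowN rsum
  rcases Nat.lt_or_ge i (N - 1) with h1 | h1
  · rw [if_pos h1, if_neg (by omega)]
    simp [List.sum_replicate]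
    ring
  · have hi : i = N - 1 := by omega
    rw [if_neg (by omega), if_pos hi]
    simp [List.sum_replicate, hi]
    have : ((N - 1 : Nat) : Int) = (N : Int) - 1 := by omega
    rw [this]; ring

theorem len_pref (N M : Nat) (h : M ≤ N) : ((List.range M).flatMap (rowN N)).length = M * N := by
  rw [List.length_flatMap]
  rw [List.map_congr_left (fun i hi => length_rowN N i (by
    have := List.mem_range.mp hi; omega))]
  simp [List.map_const', List.sum_replicate, smul_eq_mul]

theorem set_replicate_mid (n k : Nat) (hk : k < n) (v : Int) :
    (List.replicate n (0 : Int)).set k v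
      = List.replicate k 0 ++ v :: List.replicate (n - k - 1) 0 := by
  induction k generalizing n with
  | zero =>
    cases n with
    | zero => omega
    | succ m => simp [List.replicate_succ]
  | succ k ih =>
    cases n with
    | zero => omega
    | succ m =>
      simp only [List.replicate_succ, List.set_cons_succ, ih m (by omega)]
      simp [Nat.succ_sub_succ]

theorem foldl_set_pref (M : Nat) (mid : List Int) (v : Int) (h : M ≤ mid.length) :
    (List.range M).foldl (fun g j => g.set j v) mid
      = List.replicate M v ++ mid.drop M := by
  induction M with
  | zero => simp
  | succ M ih =>
    rw [List.range_succ, List.foldl_append, ih (by omega)]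
    simp only [List.foldl_cons, List.foldl_nil]
    rw [List.set_append_right _ _ (by simp)]
    simp only [List.length_replicate, Nat.sub_self]
    rw [List.drop_eq_getElem_cons (by omega : M < mid.length), List.set_cons_zero]
    simp [List.replicate_succ']

theorem foldl_set_shift (M : Nat) (pre rest : List Int) (v : Int) :
    (List.range M).foldl (fun g j => g.set (pre.length + j) v) (pre ++ rest)
      = pre ++ (List.range M).foldl (fun g j => g.set j v) rest := by
  induction M with
  | zero => simp
  | succ M ih =>
    rw [List.range_succ, List.foldl_append, ih]
    simp only [List.foldl_cons, List.foldl_nil]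
    rw [List.set_append_right _ _ (by omega)]
    simp

theorem row_eq (N M : Nat) (h : M < N) :
    List.replicate M (-1 : Int)
      ++ ((((List.replicate N (0 : Int)).set (N - 1) 1).set M 1).drop M) = rowN N M := by
  have hs1 : (List.replicate N (0 : Int)).set (N - 1) 1
      = List.replicate (N - 1) 0 ++ [1] := by
    rw [set_replicate_mid N (N - 1) (by omega) 1]
    have e : N - (N - 1) - 1 = 0 := by omega
    simp [e]
  rcases Nat.lt_or_ge M (N - 1) with h1 | h1
  · rw [hs1, List.set_append_left _ _ (by simp; omega)]
    rw [set_replicate_mid (N - 1) M (by omega) 1]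
    rw [List.append_assoc]
    rw [List.drop_left' (by simp)]
    unfold rowN
    rw [if_pos h1]
    have e : N - 1 - M - 1 = N - M - 2 := by omega
    simp [e]
  · have hM : M = N - 1 := by omega
    rw [hs1, List.set_append_right _ _ (by simp; omega)]
    have h0 : M - (List.replicate (N - 1) (0 : Int)).length = 0 := by simp; omega
    rw [h0]
    simp only [List.set_cons_zero]
    rw [hM, List.drop_left' (by simp)]
    unfold rowN
    rw [if_neg (by omega)]

theorem repl_split (N M : Nat) (h : M < N) :
    List.replicate ((N - M) * N) (0 : Int)
      = List.replicate N 0 ++ List.replicate ((N - M - 1) * N) 0 := by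
  rw [← List.replicate_add]
  congr 1
  conv_lhs => rw [show N - M = (N - M - 1) + 1 from by omega]
  rw [Nat.succ_mul]
  omega

theorem stepA_on (N M : Nat) (h : M < N) (pre : List Int) (hpre : pre.length = M * N) :
    stepA N (pre ++ List.replicate ((N - M) * N) 0) M
      = pre ++ (rowN N M ++ List.replicate ((N - M - 1) * N) 0) := by
  unfold stepA
  rw [repl_split N M h]
  have e1 : M * N + N - 1 = pre.length + (N - 1) := by omega
  have e2 : M * N + M = pre.length + M := by omega
  have hA : (pre ++ (List.replicate N (0 : Int) ++ List.replicate ((N - M - 1) * N) 0)).set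
        (pre.length + (N - 1)) 1
      = pre ++ ((List.replicate N (0 : Int)).set (N - 1) 1
          ++ List.replicate ((N - M - 1) * N) 0) := by
    rw [List.set_append_right _ _ (by omega), Nat.add_sub_cancel_left,
      List.set_append_left _ _ (by simp; omega)]
  have hB : (pre ++ ((List.replicate N (0 : Int)).set (N - 1) 1
          ++ List.replicate ((N - M - 1) * N) 0)).set (pre.length + M) 1
      = pre ++ (((List.replicate N (0 : Int)).set (N - 1) 1).set M 1
          ++ List.replicate ((N - M - 1) * N) 0) := by
    rw [List.set_append_right _ _ (by omega), Nat.add_sub_cancel_left,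
      List.set_append_left _ _ (by simp; omega)]
  rw [e1, hA, e2, hB]
  have efun : (fun (g : List Int) (j : Nat) => g.set (M * N + j) (-1 : Int))
      = fun g j => g.set (pre.length + j) (-1) := by
    funext g j; rw [hpre]
  rw [efun, foldl_set_shift]
  congr 1
  rw [foldl_set_pref M _ _ (by
    simp only [List.length_append, List.length_set, List.length_replicate]
    exact le_trans h.le (Nat.le_add_right N _))]
  rw [List.drop_append]
  rw [show M - ((((List.replicate N (0 : Int)).set (N - 1) 1).set M 1)).length = 0 from by
    simp; omega]
  rw [List.drop_zero, ← List.append_assoc, row_eq N M h]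

theorem invA (N : Nat) (M : Nat) (h : M ≤ N) :
    (List.range M).foldl (stepA N) (List.replicate (N * N) 0)
      = (List.range M).flatMap (rowN N) ++ List.replicate ((N - M) * N) 0 := by
  induction M with
  | zero => simp
  | succ M ih =>
    rw [List.range_succ, List.foldl_append, ih (by omega)]
    simp only [List.foldl_cons, List.foldl_nil]
    rw [stepA_on N M (by omega) _ (len_pref N M (by omega))]
    rw [List.flatMap_append, List.flatMap_singleton]
    simp [List.append_assoc, Nat.sub_sub]

theorem stepB_on (N M : Nat) (h : M < N) (pre : List Int) (hpre : pre.length = M * N) :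
    stepB N (pre ++ List.replicate ((N - M) * N) 0) M
      = pre ++ (rowN N M ++ List.replicate ((N - M - 1) * N) 0) := by
  unfold stepB
  rw [List.take_left' hpre]
  rw [List.drop_append]
  rw [List.drop_eq_nil_of_le (by rw [hpre, Nat.succ_mul]; omega)]
  rw [hpre, show (M + 1) * N - M * N = N from by rw [Nat.succ_mul]; omega]
  rw [List.drop_replicate]
  have hmul : (N - M) * N = (N - M - 1) * N + N := by
    conv_lhs => rw [show N - M = (N - M - 1) + 1 from by omega]
    rw [Nat.succ_mul]
  rw [show (N - M) * N - N = (N - M - 1) * N from by omega]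
  simp [List.append_assoc]

theorem invB (N : Nat) (M : Nat) (h : M ≤ N) :
    (List.range M).foldl (stepB N) (List.replicate (N * N) 0)
      = (List.range M).flatMap (rowN N) ++ List.replicate ((N - M) * N) 0 := by
  induction M with
  | zero => simp
  | succ M ih =>
    rw [List.range_succ, List.foldl_append, ih (by omega)]
    simp only [List.foldl_cons, List.foldl_nil]
    rw [stepB_on N M (by omega) _ (len_pref N M (by omega))]
    rw [List.flatMap_append, List.flatMap_singleton]
    simp [List.append_assoc, Nat.sub_sub]

theorem innerSum (L : List Int) (b : List Int) (i : Nat) (h : i < b.length) :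
    L.foldl (fun b x => b.set i (b.getD i 0 + x)) b
      = b.set i (b.getD i 0 + L.sum) := by
  induction L generalizing b with
  | nil =>
    simp only [List.foldl_nil, List.sum_nil, add_zero]
    rw [List.getD_eq_getElem _ _ h, List.set_getElem_self]
  | cons x L ih =>
    simp only [List.foldl_cons]
    rw [ih _ (by simp [h])]
    rw [List.getD_eq_getElem (b.set i _) _ (by simp [h]),
      List.getElem_set_self, List.set_set]
    rw [List.getD_eq_getElem _ _ h]
    simp [add_assoc]

theorem row_of_g (N M : Nat) (h : M < N) :
    (List.range N).map (fun (j : Nat) => (gsp N).getD (M * N + j) 0)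
      = rowN N M := by
  have hsplit : gsp N = (List.range M).flatMap (rowN N)
      ++ (rowN N M ++ ((List.range (N - M - 1)).map (fun x => M + 1 + x)).flatMap (rowN N)) := by
    unfold gsp
    conv_lhs => rw [show List.range N = List.range ((M + 1) + (N - M - 1)) from by
      rw [show (M + 1) + (N - M - 1) = N from by omega]]
    rw [List.range_add, List.flatMap_append, List.range_succ, List.flatMap_append,
      List.flatMap_singleton, List.append_assoc]
  apply List.ext_getElem (by simp [length_rowN N M h])
  intro i h1 h2
  have hiN : i < N := by simpa using h1
  simp only [List.getElem_map, List.getElem_range]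
  rw [hsplit]
  have hpl : ((List.range M).flatMap (rowN N)).length = M * N := len_pref N M (by omega)
  rw [List.getD_eq_getElem _ _ (by
    simp only [List.length_append, hpl, length_rowN N M h]; omega)]
  rw [List.getElem_append_right (by omega)]
  rw [List.getElem_append_left (by rw [hpl, Nat.add_sub_cancel_left, length_rowN N M h]; exact hiN)]
  congr 1
  rw [hpl, Nat.add_sub_cancel_left]

theorem bA (N : Nat) (M : Nat) (h : M ≤ N) :
    (List.range M).foldl (fun b i =>
        (List.range N).foldl (fun b j =>
          b.set i (b.getD i 0 + (gsp N).getD (i * N + j) 0)) b)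
      (List.replicate N 0)
      = (List.range M).map (rsum N) ++ List.replicate (N - M) 0 := by
  induction M with
  | zero => simp
  | succ M ih =>
    rw [List.range_succ, List.foldl_append, ih (by omega)]
    simp only [List.foldl_cons, List.foldl_nil]
    have hM : M < N := by omega
    have hlen : ((List.range M).map (rsum N) ++ List.replicate (N - M) (0 : Int)).length = N := by
      simp; omega
    rw [← List.foldl_map (f := fun j : Nat => (gsp N).getD (M * N + j) 0)
      (g := fun (b : List Int) (x : Int) => b.set M (b.getD M 0 + x))]
    rw [row_of_g N M hM]
    rw [innerSum _ _ M (by rw [hlen]; exact hM)]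
    rw [sum_rowN N M hM]
    have hget : ((List.range M).map (rsum N)
        ++ List.replicate (N - M) (0 : Int)).getD M 0 = 0 := by
      rw [List.getD_eq_getElem _ _ (by rw [hlen]; exact hM)]
      rw [List.getElem_append_right (by simp)]
      simp
    rw [hget, zero_add]
    rw [List.set_append_right _ _ (by simp)]
    rw [show M - ((List.range M).map (rsum N)).length = 0 from by simp]
    rw [show N - M = (N - M - 1) + 1 from by omega, List.replicate_succ, List.set_cons_zero]
    rw [List.map_append]
    simp [Nat.sub_sub]

theorem bB (N : Nat) (h : 0 < N) :
    (PySem.List.pyRange 0 ((N : Int) - 1) 1).map (fun i => 2 - i)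
      ++ (if (0 : Int) < (N : Int) then [2 - (N : Int)] else [])
      = (List.range N).map (rsum N) := by
  obtain ⟨m, rfl⟩ : ∃ m, N = m + 1 := ⟨N - 1, by omega⟩
  rw [if_pos (by exact_mod_cast h)]
  rw [show ((m + 1 : Nat) : Int) - 1 = ((m : Nat) : Int) from by push_cast; ring]
  rw [PySem.List.pyRange_zero_nat, List.map_map]
  rw [List.range_succ, List.map_append]
  congr 1
  · apply List.map_congr_left
    intro k hk
    have : k < m := List.mem_range.mp hk
    simp only [Function.comp_apply]
    unfold rsum
    rw [if_neg (by omega)]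
  · simp [rsum]

theorem cast_mul (i N : Nat) : ((i * N : Nat) : Int) = (i : Int) * (N : Int) := by
  push_cast; ring

theorem arrGetD (a : Array Int) (i : Nat) (d : Int) : a.getD i d = a.toList.getD i d := by
  unfold Array.getD
  split
  · rename_i h
    rw [List.getD_eq_getElem _ _ (by simpa using h)]
    simp
  · rename_i h
    rw [List.getD_eq_default _ _ (by simpa using h)]

theorem arrFoldl {a : Type} (L : List a) (f : Array Int → a → Array Int)
    (f' : List Int → a → List Int) (h : ∀ (g : Array Int) (x : a), (f g x).toList = f' g.toList x) :
    ∀ (g : Array Int), (L.foldl f g).toList = L.foldl f' g.toList := by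
  induction L with
  | nil => intro g; simp
  | cons x L ih =>
    intro g
    simp only [List.foldl_cons]
    rw [ih, h]

theorem gfold_list (N : Nat) :
    (PySem.List.pyRange 0 (N : Int) 1).foldl (fun g i =>
      (PySem.List.pyRange 0 i 1).foldl (fun g j => g.set (i * (N : Int) + j).toNat (-1))
        ((g.set (i * (N : Int) + (N : Int) - 1).toNat 1).set (i * (N : Int) + i).toNat 1))
      (List.replicate (N * N) 0) = gsp N := by
  rw [PySem.List.pyRange_zero_nat, List.foldl_map]
  refine Eq.trans (PySem.List.foldl_congr_mem _ _ (stepA N) _ ?_) ?_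
  case _ =>
    intro g i hi
    have hiN : i < N := List.mem_range.mp hi
    have hc := cast_mul i N
    have c1 : ((i : Int) * (N : Int) + (N : Int) - 1).toNat = i * N + N - 1 := by omega
    have c2 : ((i : Int) * (N : Int) + (i : Int)).toNat = i * N + i := by omega
    rw [c1, c2, PySem.List.pyRange_zero_nat, List.foldl_map]
    unfold stepA
    apply PySem.List.foldl_congr_mem
    intro g' j hj
    have c3 : ((i : Int) * (N : Int) + (j : Int)).toNat = i * N + j := by omega
    rw [c3]
  case _ =>
    rw [invA N N le_rfl]; simp [gsp]

theorem bfold_list (N : Nat) (gl : List Int) :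
    (PySem.List.pyRange 0 (N : Int) 1).foldl (fun b i =>
      (PySem.List.pyRange 0 (N : Int) 1).foldl (fun b j =>
        b.set i.toNat (b.getD i.toNat 0 + gl.getD (i * (N : Int) + j).toNat 0)) b)
      (List.replicate N 0)
      = (List.range N).foldl (fun b i =>
          (List.range N).foldl (fun b j =>
            b.set i (b.getD i 0 + gl.getD (i * N + j) 0)) b)
          (List.replicate N 0) := by
  rw [PySem.List.pyRange_zero_nat, List.foldl_map]
  apply PySem.List.foldl_congr_mem
  intro b i _
  rw [List.foldl_map]
  apply PySem.List.foldl_congr_mem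
  intro b' j _
  simp only [Int.toNat_natCast]
  rw [show ((i : Int) * (N : Int) + (j : Int)).toNat = i * N + j from by
    have hc := cast_mul i N; omega]

theorem castA (N : Nat) (_h : 0 < N) :
    equation_2 (N : Int)
      = (gsp N,
         (List.range N).foldl (fun b i =>
            (List.range N).foldl (fun b j =>
              b.set i (b.getD i 0 + (gsp N).getD (i * N + j) 0)) b)
          (List.replicate N 0)) := by
  have hg0 : ((PySem.List.pyRange 0 ((N : Int) * (N : Int)) 1).map (fun _ => (0 : Int))).toArray
      = (List.replicate (N * N) (0 : Int)).toArray := by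
    rw [show ((N : Int) * (N : Int)) = ((N * N : Nat) : Int) from by push_cast; ring]
    rw [PySem.List.pyRange_zero_nat, List.map_map]
    simp [Function.comp_def, List.map_const']
  have hb0 : ((PySem.List.pyRange 0 (N : Int) 1).map (fun _ => (0 : Int))).toArray
      = (List.replicate N (0 : Int)).toArray := by
    rw [PySem.List.pyRange_zero_nat, List.map_map]
    simp [Function.comp_def, List.map_const']
  have hgfold : (PySem.List.pyRange 0 (N : Int) 1).foldl (fun g i =>
      (PySem.List.pyRange 0 i 1).foldl (fun g j => g.setIfInBounds (i * (N : Int) + j).toNat (-1))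
        ((g.setIfInBounds (i * (N : Int) + (N : Int) - 1).toNat 1).setIfInBounds
          (i * (N : Int) + i).toNat 1))
      ((List.replicate (N * N) (0 : Int)).toArray) = (gsp N).toArray := by
    rw [← Array.toList_inj]
    rw [arrFoldl _ _ (fun g i =>
        (PySem.List.pyRange 0 i 1).foldl (fun g j => g.set (i * (N : Int) + j).toNat (-1))
          ((g.set (i * (N : Int) + (N : Int) - 1).toNat 1).set (i * (N : Int) + i).toNat 1))
      (by
        intro g x
        rw [arrFoldl _ _ (fun g j => g.set (x * (N : Int) + j).toNat (-1))
          (fun g j => Array.toList_setIfInBounds)]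
        simp only [Array.toList_setIfInBounds])]
    simp only [List.toList_toArray]
    exact gfold_list N
  have hbfold : ((PySem.List.pyRange 0 (N : Int) 1).foldl (fun b i =>
      (PySem.List.pyRange 0 (N : Int) 1).foldl (fun b j =>
        b.setIfInBounds i.toNat (b.getD i.toNat 0 + (gsp N).toArray.getD (i * (N : Int) + j).toNat 0)) b)
      ((List.replicate N (0 : Int)).toArray)).toList
      = (List.range N).foldl (fun b i =>
          (List.range N).foldl (fun b j =>
            b.set i (b.getD i 0 + (gsp N).getD (i * N + j) 0)) b)
          (List.replicate N 0) := by
    rw [arrFoldl _ _ (fun b i =>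
        (PySem.List.pyRange 0 (N : Int) 1).foldl (fun b j =>
          b.set i.toNat (b.getD i.toNat 0 + (gsp N).getD (i * (N : Int) + j).toNat 0)) b)
      (by
        intro b x
        rw [arrFoldl _ _ (fun b j =>
            b.set x.toNat (b.getD x.toNat 0 + (gsp N).getD (x * (N : Int) + j).toNat 0))
          (by
            intro b' j
            rw [Array.toList_setIfInBounds, arrGetD, arrGetD])])]
    simp only [List.toList_toArray]
    exact bfold_list N (gsp N)
  simp only [equation_2, hg0, hb0, hgfold, hbfold, List.toList_toArray]

theorem castB (N : Nat) (h : 0 < N) :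
    equation_2_alt (N : Int) = (gsp N, (List.range N).map (rsum N)) := by
  have hg0 : (((N : Int) * (N : Int)).toNat) = N * N := by
    have := cast_mul N N; omega
  have hgfold : (PySem.List.pyRange 0 (N : Int) 1).foldl (fun g i =>
      g.take (i * (N : Int)).toNat
        ++ (if i < (N : Int) - 1 then
              List.replicate i.toNat (-1 : Int) ++ [1]
                ++ List.replicate ((N : Int) - i - 2).toNat (0 : Int) ++ [1]
            else List.replicate i.toNat (-1 : Int) ++ [1])
        ++ g.drop ((i + 1) * (N : Int)).toNat)
      (List.replicate (N * N) 0) = gsp N := by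
    rw [PySem.List.pyRange_zero_nat, List.foldl_map]
    refine Eq.trans (PySem.List.foldl_congr_mem _ _ (stepB N) _ ?_) ?_
    case _ =>
      intro g i hi
      have hiN : i < N := List.mem_range.mp hi
      have hc := cast_mul i N
      have hc1 : (((i : Int) + 1) * (N : Int)).toNat = (i + 1) * N := by
        rw [show ((i : Int) + 1) * (N : Int) = (((i + 1) * N : Nat) : Int) from by
          push_cast; ring, Int.toNat_natCast]
      unfold stepB rowN
      rcases Nat.lt_or_ge i (N - 1) with h1 | h1
      · rw [if_pos (show (i : Int) < (N : Int) - 1 from by omega), if_pos h1]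
        rw [show ((N : Int) - (i : Int) - 2).toNat = N - i - 2 from by omega]
        rw [show ((i : Int) * (N : Int)).toNat = i * N from by omega]
        rw [Int.toNat_natCast, hc1]
        simp
      · rw [if_neg (show ¬ (i : Int) < (N : Int) - 1 from by omega), if_neg (by omega)]
        rw [show ((i : Int) * (N : Int)).toNat = i * N from by omega]
        rw [Int.toNat_natCast, hc1]
    case _ =>
      rw [invB N N le_rfl]; simp [gsp]
  simp only [equation_2_alt, hg0, hgfold, bB N h]

-- ===== VERDICT (by name: the statement is the Claim_ definition above) =====
theorem equation_2_spec : Claim_equal_equation_2 := by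
  intro n _
  unfold Spec_equation_2
  rcases (by omega : n ≤ 0 ∨ 0 < n) with hn | hn
  · have hr : PySem.List.pyRange 0 n 1 = [] := PySem.List.pyRange_one_eq_nil hn
    have hr2 : PySem.List.pyRange 0 (n - 1) 1 = [] := PySem.List.pyRange_one_eq_nil (by omega)
    have hgg : (PySem.List.pyRange 0 (n * n) 1).map (fun _ => (0 : Int))
        = List.replicate (n * n).toNat 0 := by
      rw [PySem.List.pyRange_one, List.map_map]
      simp [Function.comp_def, List.map_const']
    simp only [equation_2, equation_2_alt, hr, hr2, hgg, List.foldl_nil, List.map_nil,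
      List.toList_toArray, List.append_nil, if_neg (not_lt.mpr hn)]
  · obtain ⟨N, rfl⟩ : ∃ N : Nat, n = (N : Int) := ⟨n.toNat, by omega⟩
    have hN : 0 < N := by exact_mod_cast hn
    rw [castA N hN, castB N hN, bA N N le_rfl]
    simp
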